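-- pv_equiv track=rewrite | github.com/wj1224/algorithm_solve | programmers/python/programmers_62049.py | solution
-- ===== SOURCE A (Python) =====
-- def solution(n):
-- 	answer = [0]
-- 	for i in range(2, n + 1):
-- 		insert_list = answer[:]
-- 		answer.append(0)
-- 		for j in range(len(insert_list) - 1, -1, -1):
-- 			answer += [1] if insert_list[j] == 0 else [0]
-- 	return answer
-- ===== SOURCE B (Python) =====
-- def solution(n):
--     if n <= 1:
--         return [0]
--     prev = solution(n - 1)
--     return prev + [0] + [1 if x == 0 else 0 for x in reversed(prev)]
-- ===== Notes on version B (the rewrite author's own statement) =====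
-- stated objective: alternative
-- what changed: Replaces A's iterative double loop (copy the list, append 0, then index backwards appending complements one by one) with a top-down recursion: each level is prev + [0] + reversed complement of prev built as a comprehension.
import Mathlib
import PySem

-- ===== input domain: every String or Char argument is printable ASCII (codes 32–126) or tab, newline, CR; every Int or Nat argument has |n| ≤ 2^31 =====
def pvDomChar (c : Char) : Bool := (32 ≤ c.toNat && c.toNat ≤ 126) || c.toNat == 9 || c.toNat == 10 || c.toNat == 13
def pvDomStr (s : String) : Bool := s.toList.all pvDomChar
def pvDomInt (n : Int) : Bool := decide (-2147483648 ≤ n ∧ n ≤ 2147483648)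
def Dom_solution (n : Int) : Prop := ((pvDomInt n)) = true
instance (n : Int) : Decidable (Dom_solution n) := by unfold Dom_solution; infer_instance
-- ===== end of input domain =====

-- B replaces A's iterative double loop with a top-down recursion (prev ++ [0] ++ reversed complement of prev); same cost, alternative decomposition.

-- ===== PORT A =====
def solution (n : Int) : List Int :=
  (PySem.List.pyRange 2 (n + 1) 1).foldl
    (fun answer _i =>
      let insert_list := answer
      let answer := answer ++ [0]
      (PySem.List.pyRange ((insert_list.length : Int) - 1) (-1) (-1)).foldl
        (fun a j => a ++ (if PySem.List.pyGetD insert_list j 0 = 0 then [1] else [0]))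
        answer)
    [0]

-- ===== PORT B =====
def solAltRec : Nat → List Int
  | 0 => [0]
  | 1 => [0]
  | (k + 2) =>
      let prev := solAltRec (k + 1)
      prev ++ [0] ++ prev.reverse.map (fun x => if x = 0 then 1 else 0)

def solution_alt (n : Int) : List Int :=
  if n ≤ 1 then [0] else solAltRec n.toNat

-- ===== PRECONDITION & SPEC =====
def Spec_solution (n : Int) (out : List Int) : Prop := out = solution_alt n
instance (n : Int) (out : List Int) : Decidable (Spec_solution n out) := by unfold Spec_solution; infer_instance

-- ===== CLAIM (what is proved, stated in full; the proofs are below) =====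
def Claim_equal_solution : Prop := ∀ (n : Int), Dom_solution n → Spec_solution n (solution n)

-- ===== LEMMAS AND PROOFS =====

/-- One level of the fractal construction. -/
def pvStep (xs : List Int) : List Int :=
  xs ++ [0] ++ xs.reverse.map (fun x => if x = 0 then 1 else 0)

/-- A's inner backwards loop appends exactly the reversed complement of `xs`. -/
lemma inner_loop_eq (xs : List Int) (acc : List Int) :
    (PySem.List.pyRange ((xs.length : Int) - 1) (-1) (-1)).foldl
      (fun a j => a ++ (if PySem.List.pyGetD xs j 0 = 0 then [1] else [0])) acc
    = acc ++ xs.reverse.map (fun x => if x = 0 then 1 else 0) := by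
  have hf : (fun (a : List Int) (j : Int) => a ++ (if PySem.List.pyGetD xs j 0 = 0 then [1] else [0]))
      = fun a j => a ++ [if PySem.List.pyGetD xs j 0 = 0 then 1 else 0] := by
    funext a j; split <;> rfl
  rw [hf, PySem.List.foldl_append_singleton_eq_map]
  congr 1
  rw [PySem.List.pyRange_neg_one, List.map_map]
  have hL : ((xs.length : Int) - 1 - (-1)).toNat = xs.length := by omega
  rw [hL]
  apply List.ext_getElem
  · simp
  · intro i h1 h2
    have hlen : i < xs.length := by simpa using h1
    simp only [List.getElem_map, List.getElem_range, List.getElem_reverse, Function.comp_apply]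
    have hcast : ((xs.length : Int) - 1 - (i : Int)) = ((xs.length - 1 - i : Nat) : Int) := by omega
    rw [hcast, PySem.List.pyGetD_natCast, List.getD_eq_getElem xs 0 (by omega)]

lemma foldl_const_iterate {α β : Type} (g : α → α) :
    ∀ (l : List β) (init : α), l.foldl (fun s _ => g s) init = g^[l.length] init := by
  intro l
  induction l with
  | nil => intro init; rfl
  | cons x t ih =>
      intro init
      simp [List.foldl_cons, ih, Function.iterate_succ_apply]

lemma solAltRec_iterate : ∀ k : Nat, solAltRec (k + 1) = pvStep^[k] [0] := by
  intro k
  induction k with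
  | zero => rfl
  | succ m ih =>
      rw [Function.iterate_succ_apply', ← ih]
      rfl

-- ===== VERDICT (by name: the statement is the Claim_ definition above) =====
theorem solution_spec : Claim_equal_solution := by
  intro n _
  unfold Spec_solution
  have hsol : solution n = pvStep^[(n + 1 - 2).toNat] [0] := by
    simp only [solution, inner_loop_eq]
    have h2 : (fun (answer : List Int) (_i : Int) =>
        answer ++ [0] ++ List.map (fun x => if x = 0 then 1 else 0) answer.reverse)
        = fun (s : List Int) (_ : Int) => pvStep s := by
      funext a i; simp [pvStep]
    rw [h2, foldl_const_iterate, PySem.List.length_pyRange_one]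
  by_cases h : n ≤ 1
  · have h0 : (n + 1 - 2).toNat = 0 := by omega
    simp [hsol, h0, solution_alt, h]
  · have h1 : (n + 1 - 2).toNat = n.toNat - 1 := by omega
    have h3 : n.toNat - 1 + 1 = n.toNat := by omega
    rw [hsol, h1, ← solAltRec_iterate (n.toNat - 1), h3]
    simp [solution_alt, h]
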